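-- pv_equiv track=rewrite | github.com/lkasym/astro-backend | kundali_calculations.py | determine_house_rulers
-- ===== SOURCE A (Python) =====
-- SIGNS = [
--     "Aries", "Taurus", "Gemini", "Cancer",
--     "Leo", "Virgo", "Libra", "Scorpio",
--     "Sagittarius", "Capricorn", "Aquarius", "Pisces"
-- ]
--
-- def sign_name(sign_number):
--     """
--     Converts a sign number (1..12) to the corresponding English zodiac name.
--     E.g. 1->Aries, 2->Taurus, etc.
--     """
--     if 1 <= sign_number <= 12:
--         return SIGNS[sign_number - 1]
--     return "Unknown"
--
-- def determine_house_rulers(asc_sign):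
--     """
--     Determines the house ruler for each house based on the Ascendant's sign.
--     """
--     sign_rulers = {
--         "Aries": "Mars", "Taurus": "Venus", "Gemini": "Mercury", "Cancer": "Moon",
--         "Leo": "Sun", "Virgo": "Mercury", "Libra": "Venus", "Scorpio": "Mars",
--         "Sagittarius": "Jupiter", "Capricorn": "Saturn", "Aquarius": "Saturn", "Pisces": "Jupiter"
--     }
--     house_rulers = {}
--     for house in range(1, 13):
--         # For Whole Sign houses, the house's sign is determined by:
--         sign_idx = (asc_sign + house - 2) % 12 + 1
--         house_rulers[house] = sign_rulers.get(sign_name(sign_idx), "Unknown")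
--     return house_rulers
-- ===== SOURCE B (Python) =====
-- CHAIN = ["Mercury", "Venus", "Mars", "Jupiter", "Saturn"]
--
-- def _ruler_of(z):
--     # Classical Chaldean rulership: the Sun rules Leo, the Moon rules Cancer,
--     # and each remaining planet rules the pair of signs at equal distance
--     # from the Leo-Cancer axis (Mercury 1 step away, ... Saturn 5 steps away).
--     fwd = (z - 4) % 12    # steps forward from Leo (zero-based sign 4)
--     back = (3 - z) % 12   # steps backward from Cancer (zero-based sign 3)
--     if fwd == 0:
--         return "Sun"
--     if back == 0:
--         return "Moon"
--     return CHAIN[min(fwd, back) - 1]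
--
-- def determine_house_rulers(asc_sign):
--     return {house: _ruler_of((asc_sign + house - 2) % 12) for house in range(1, 13)}
-- ===== Notes on version B (the rewrite author's own statement) =====
-- stated objective: alternative
-- what changed: Drops both lookup tables (sign names and the name-to-ruler dict) and instead computes each sign's ruler arithmetically from the classical Chaldean rulership symmetry: Sun rules Leo, Moon rules Cancer, and the ruler of any other sign is chosen by its minimum distance to the Leo-Cancer axis along a 5-planet chain.
import Mathlib
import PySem

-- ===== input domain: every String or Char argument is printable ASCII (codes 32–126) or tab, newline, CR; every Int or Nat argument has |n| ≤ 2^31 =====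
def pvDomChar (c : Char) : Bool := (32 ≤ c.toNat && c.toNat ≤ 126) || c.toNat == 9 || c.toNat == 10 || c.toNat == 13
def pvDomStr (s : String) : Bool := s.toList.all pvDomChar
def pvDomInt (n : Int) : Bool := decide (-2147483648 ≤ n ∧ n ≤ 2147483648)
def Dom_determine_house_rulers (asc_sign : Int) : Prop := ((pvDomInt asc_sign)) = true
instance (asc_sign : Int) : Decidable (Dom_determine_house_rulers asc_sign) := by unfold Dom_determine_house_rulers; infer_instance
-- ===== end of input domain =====

-- B replaces A's sign-name and name-to-ruler tables with the Chaldean rulership symmetry: each sign's ruler is computed from its modular distance to the Leo-Cancer axis (objective: alternative).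


-- ===== PORT A =====
def SIGNS : List String :=
  ["Aries", "Taurus", "Gemini", "Cancer",
   "Leo", "Virgo", "Libra", "Scorpio",
   "Sagittarius", "Capricorn", "Aquarius", "Pisces"]

-- SIGNS[sign_number - 1]: the guard ensures the index is in range, so the default is never reached
def sign_name (sign_number : Int) : String :=
  if 1 ≤ sign_number ∧ sign_number ≤ 12 then PySem.List.pyGetD SIGNS (sign_number - 1) ""
  else "Unknown"

def sign_rulers : PySem.Dict String String :=
  PySem.Dict.ofList
    [("Aries", "Mars"), ("Taurus", "Venus"), ("Gemini", "Mercury"), ("Cancer", "Moon"),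
     ("Leo", "Sun"), ("Virgo", "Mercury"), ("Libra", "Venus"), ("Scorpio", "Mars"),
     ("Sagittarius", "Jupiter"), ("Capricorn", "Saturn"), ("Aquarius", "Saturn"), ("Pisces", "Jupiter")]

def determine_house_rulers (asc_sign : Int) : List (Int × String) :=
  ((PySem.List.pyRange 1 13 1).foldl
    (fun house_rulers house =>
      house_rulers.insert house
        (sign_rulers.getD (sign_name (PySem.Int.mod (asc_sign + house - 2) 12 + 1)) "Unknown"))
    PySem.Dict.empty).items

-- ===== PORT B =====
def CHAIN : List String := ["Mercury", "Venus", "Mars", "Jupiter", "Saturn"]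

-- CHAIN[min fwd back - 1]: for 0 ≤ z < 12 the index is always in range, so the default is never reached
def ruler_of (z : Int) : String :=
  let fwd := PySem.Int.mod (z - 4) 12
  let back := PySem.Int.mod (3 - z) 12
  if fwd = 0 then "Sun"
  else if back = 0 then "Moon"
  else PySem.List.pyGetD CHAIN (min fwd back - 1) ""

def determine_house_rulers_alt (asc_sign : Int) : List (Int × String) :=
  (PySem.List.pyRange 1 13 1).map
    (fun house => (house, ruler_of (PySem.Int.mod (asc_sign + house - 2) 12)))

-- ===== PRECONDITION & SPEC =====
def Spec_determine_house_rulers (asc_sign : Int) (out : List (Int × String)) : Prop := out = determine_house_rulers_alt asc_sign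
instance (asc_sign : Int) (out : List (Int × String)) : Decidable (Spec_determine_house_rulers asc_sign out) := by unfold Spec_determine_house_rulers; infer_instance

-- ===== CLAIM (what is proved, stated in full; the proofs are below) =====
def Claim_equal_determine_house_rulers : Prop := ∀ (asc_sign : Int), Dom_determine_house_rulers asc_sign → Spec_determine_house_rulers asc_sign (determine_house_rulers asc_sign)

-- ===== LEMMAS AND PROOFS =====

-- A's result depends on asc_sign only through (asc_sign - 1) % 12
lemma A_congr (a b : Int) (h : PySem.Int.mod (a - 1) 12 = PySem.Int.mod (b - 1) 12) :
    determine_house_rulers a = determine_house_rulers b := by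
  have k : ∀ hse : Int, PySem.Int.mod (a + hse - 2) 12 = PySem.Int.mod (b + hse - 2) 12 := by
    intro hse
    simp only [PySem.Int.mod_eq_emod_of_pos (b := (12:Int)) (by norm_num)] at h ⊢
    omega
  unfold determine_house_rulers
  simp only [show PySem.List.pyRange 1 13 1 = [1,2,3,4,5,6,7,8,9,10,11,12] from by decide,
    List.foldl, k]

-- B's result likewise depends only on (asc_sign - 1) % 12
lemma B_congr (a b : Int) (h : PySem.Int.mod (a - 1) 12 = PySem.Int.mod (b - 1) 12) :
    determine_house_rulers_alt a = determine_house_rulers_alt b := by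
  have k : ∀ hse : Int, PySem.Int.mod (a + hse - 2) 12 = PySem.Int.mod (b + hse - 2) 12 := by
    intro hse
    simp only [PySem.Int.mod_eq_emod_of_pos (b := (12:Int)) (by norm_num)] at h ⊢
    omega
  unfold determine_house_rulers_alt
  simp only [show PySem.List.pyRange 1 13 1 = [1,2,3,4,5,6,7,8,9,10,11,12] from by decide,
    List.map, k]

lemma agree_small : ∀ r : Int, 0 ≤ r → r < 12 →
    determine_house_rulers (r + 1) = determine_house_rulers_alt (r + 1) := by
  intro r h1 h2
  interval_cases r <;> decide

-- ===== VERDICT (by name: the statement is the Claim_ definition above) =====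
theorem determine_house_rulers_spec : Claim_equal_determine_house_rulers := by
  intro asc _
  unfold Spec_determine_house_rulers
  have hmm : PySem.Int.mod (asc - 1) 12 = PySem.Int.mod ((PySem.Int.mod (asc - 1) 12 + 1) - 1) 12 := by
    have h1 := PySem.Int.mod_nonneg (asc - 1) (b := 12) (by norm_num)
    have h2 := PySem.Int.mod_lt (asc - 1) (b := 12) (by norm_num)
    simp only [PySem.Int.mod_eq_emod_of_pos (b := (12:Int)) (by norm_num)] at *
    omega
  rw [A_congr _ _ hmm, B_congr _ _ hmm]
  exact agree_small _ (PySem.Int.mod_nonneg (asc - 1) (by norm_num))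
    (PySem.Int.mod_lt (asc - 1) (by norm_num))
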